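-- pv_equiv track=rewrite | github.com/Rossignol-fr/Bezier | Bezier_pts_v5.py | PFigS4ToListePts
-- ===== SOURCE A (Python) =====
-- def PFigS4ToListePts(L):
--     """Renvoie la listes des points primitifs d'une figure S4 de paramètres
--     situés dans la liste L"""
--     Dep =[(L[0],L[0])]
--     Ls = [(L[0]+L[3],L[0]+L[4]),(L[1]+L[5],L[2]+L[6]),(L[1],L[2]),
--             (L[1]-L[5],L[6]-L[2]),(L[1],-L[2]),
--             (L[0]+L[3],-L[0]-L[4]),(L[0],-L[0])]
--     Lc = [k for k in Ls]
--     for k in range(3):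
--         Lc = [(v,-u) for (u,v) in Lc]
--         Ls += Lc
--     del(Lc)
--     return Dep+Ls
-- ===== SOURCE B (Python) =====
-- def PFigS4ToListePts(L):
--     """Renvoie la listes des points primitifs d'une figure S4 de paramètres
--     situés dans la liste L"""
--     a, b, c, d, e, f, g = L[:7]
--     return [(a, a),
--             # quadrant 0
--             (a + d, a + e), (b + f, c + g), (b, c), (b - f, g - c),
--             (b, -c), (a + d, -a - e), (a, -a),
--             # quadrant 1: (u,v) -> (v,-u)
--             (a + e, -a - d), (c + g, -b - f), (c, -b), (g - c, f - b),
--             (-c, -b), (-a - e, -a - d), (-a, -a),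
--             # quadrant 2: (u,v) -> (-u,-v)
--             (-a - d, -a - e), (-b - f, -c - g), (-b, -c), (f - b, c - g),
--             (-b, c), (-a - d, a + e), (-a, a),
--             # quadrant 3: (u,v) -> (-v,u)
--             (-a - e, a + d), (-c - g, b + f), (-c, b), (c - g, b - f),
--             (c, b), (a + e, a + d), (a, a)]
-- ===== Notes on version B (the rewrite author's own statement) =====
-- stated objective: simpler
-- what changed: Replaces the rotation machinery (the threaded accumulator Lc rotated three times and appended) by the fully unrolled closed form: the 29 points are written out directly as linear combinations of the 7 parameters, with no loop at all.
-- outside the precondition, e.g. on PFigS4ToListePts([1, 2, 3]): A raises IndexError, B raises ValueError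
import Mathlib
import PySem

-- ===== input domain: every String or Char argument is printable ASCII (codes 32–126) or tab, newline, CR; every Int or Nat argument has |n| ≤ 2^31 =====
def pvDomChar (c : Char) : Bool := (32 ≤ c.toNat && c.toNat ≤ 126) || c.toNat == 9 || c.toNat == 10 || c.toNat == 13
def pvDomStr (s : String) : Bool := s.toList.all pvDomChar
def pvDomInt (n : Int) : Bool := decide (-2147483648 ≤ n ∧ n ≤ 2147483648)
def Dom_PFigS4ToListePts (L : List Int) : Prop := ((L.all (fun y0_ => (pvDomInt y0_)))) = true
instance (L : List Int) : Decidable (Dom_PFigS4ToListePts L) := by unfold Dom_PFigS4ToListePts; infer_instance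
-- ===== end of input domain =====

-- B replaces A's rotation loop by the fully unrolled closed form: all 29 points written
-- out explicitly as linear combinations of the 7 parameters (objective: simpler).

-- ===== PORT A =====
-- A indexes L[0]..L[6]; on a shorter list Python raises IndexError (pyGet? = none), the port returns [].
def PFigS4ToListePts (L : List Int) : List (Int × Int) :=
  match PySem.List.pyGet? L 0, PySem.List.pyGet? L 1, PySem.List.pyGet? L 2,
        PySem.List.pyGet? L 3, PySem.List.pyGet? L 4, PySem.List.pyGet? L 5,
        PySem.List.pyGet? L 6 with
  | some l0, some l1, some l2, some l3, some l4, some l5, some l6 =>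
    let Dep : List (Int × Int) := [(l0, l0)]
    let Ls : List (Int × Int) :=
      [(l0 + l3, l0 + l4), (l1 + l5, l2 + l6), (l1, l2),
       (l1 - l5, l6 - l2), (l1, -l2),
       (l0 + l3, -l0 - l4), (l0, -l0)]
    let Lc := Ls.map (fun k => k)
    let st := (List.range 3).foldl
      (fun (st : List (Int × Int) × List (Int × Int)) _ =>
        let Lc' := st.2.map (fun uv => (uv.2, -uv.1))
        (st.1 ++ Lc', Lc')) (Ls, Lc)
    Dep ++ st.1
  | _, _, _, _, _, _, _ => []

-- ===== PORT B =====
-- B unpacks the first 7 elements (a,b,c,d,e,f,g = L[:7]; on a shorter list Python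
-- raises ValueError, the port returns []) and returns the literal list of 29 points.
def PFigS4ToListePts_alt (L : List Int) : List (Int × Int) :=
  match L with
  | a :: b :: c :: d :: e :: f :: g :: _ =>
    [(a, a),
     (a + d, a + e), (b + f, c + g), (b, c), (b - f, g - c),
     (b, -c), (a + d, -a - e), (a, -a),
     (a + e, -a - d), (c + g, -b - f), (c, -b), (g - c, f - b),
     (-c, -b), (-a - e, -a - d), (-a, -a),
     (-a - d, -a - e), (-b - f, -c - g), (-b, -c), (f - b, c - g),
     (-b, c), (-a - d, a + e), (-a, a),
     (-a - e, a + d), (-c - g, b + f), (-c, b), (c - g, b - f),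
     (c, b), (a + e, a + d), (a, a)]
  | _ => []

-- ===== PRECONDITION & SPEC =====
-- Pre_ excludes lists shorter than 7, on which the Python A raises IndexError.
def Pre_PFigS4ToListePts (L : List Int) : Prop := 7 ≤ L.length
instance (L : List Int) : Decidable (Pre_PFigS4ToListePts L) := by unfold Pre_PFigS4ToListePts; infer_instance
def pvWitness_PFigS4ToListePts : List Int := [1, 2, 3, 4, 5, 6, 7]

def Spec_PFigS4ToListePts (L : List Int) (out : List (Int × Int)) : Prop := out = PFigS4ToListePts_alt L
instance (L : List Int) (out : List (Int × Int)) : Decidable (Spec_PFigS4ToListePts L out) := by unfold Spec_PFigS4ToListePts; infer_instance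

-- ===== CLAIM =====
def Claim_equal_PFigS4ToListePts : Prop := ∀ (L : List Int), Dom_PFigS4ToListePts L → Pre_PFigS4ToListePts L → Spec_PFigS4ToListePts L (PFigS4ToListePts L)

-- ===== LEMMAS AND PROOFS =====

-- ===== VERDICT =====
theorem PFigS4ToListePts_spec : Claim_equal_PFigS4ToListePts := by
  intro L _ hpre
  unfold Pre_PFigS4ToListePts at hpre
  unfold Spec_PFigS4ToListePts
  rcases L with _ | ⟨a, _ | ⟨b, _ | ⟨c, _ | ⟨d, _ | ⟨e, _ | ⟨f, _ | ⟨g, t⟩⟩⟩⟩⟩⟩⟩ <;>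
    simp only [List.length] at hpre <;> try omega
  have h0 := PySem.List.pyGet?_ofNat (xs := a::b::c::d::e::f::g::t) (n := 0) (by simp)
  have h1 := PySem.List.pyGet?_ofNat (xs := a::b::c::d::e::f::g::t) (n := 1) (by simp)
  have h2 := PySem.List.pyGet?_ofNat (xs := a::b::c::d::e::f::g::t) (n := 2) (by simp)
  have h3 := PySem.List.pyGet?_ofNat (xs := a::b::c::d::e::f::g::t) (n := 3) (by simp)
  have h4 := PySem.List.pyGet?_ofNat (xs := a::b::c::d::e::f::g::t) (n := 4) (by simp)
  have h5 := PySem.List.pyGet?_ofNat (xs := a::b::c::d::e::f::g::t) (n := 5) (by simp)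
  have h6 := PySem.List.pyGet?_ofNat (xs := a::b::c::d::e::f::g::t) (n := 6) (by simp)
  simp only [List.getElem_cons_zero, List.getElem_cons_succ, Nat.cast_ofNat, Nat.cast_one,
    Nat.cast_zero] at h0 h1 h2 h3 h4 h5 h6
  simp [PFigS4ToListePts, PFigS4ToListePts_alt, h0, h1, h2, h3, h4, h5, h6, List.range_succ]
  and_intros <;> first | trivial | ring
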